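-- pv_equiv track=rewrite | github.com/mukerem/WebScrapping | codeforces/archive/Queue_91B.py | walrus_displeasure
-- ===== SOURCE A (Python) =====
-- from typing import List
--
-- def walrus_displeasure(n: int, arr: List[int]) -> List[int]:
--     result = [-1] * n
--     arr = [(val, idx) for idx, val in enumerate(arr)]
--     arr.sort()
--
--     maxx = -1
--     for val, idx in arr:
--         if maxx < idx:
--             result[idx] = -1
--             maxx = idx
--         else:
--             result[idx] = maxx - idx - 1
--     return result
-- ===== SOURCE B (Python) =====
-- from typing import List
--
-- def walrus_displeasure(n: int, arr: List[int]) -> List[int]: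
--     m = len(arr)
--
--     def furthest(i: int) -> int:
--         for j in range(m - 1, i, -1):
--             if arr[j] < arr[i]:
--                 return j - i - 1
--         return -1
--
--     return [furthest(i) for i in range(m)] + [-1] * (n - m)
-- ===== Notes on version B (the rewrite author's own statement) =====
-- stated objective: alternative
-- what changed: A sorts the (value,index) pairs and sweeps them tracking a running maximum index; B instead computes each entry directly by scanning right-to-left for the furthest element strictly smaller than arr[i].
import Mathlib
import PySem

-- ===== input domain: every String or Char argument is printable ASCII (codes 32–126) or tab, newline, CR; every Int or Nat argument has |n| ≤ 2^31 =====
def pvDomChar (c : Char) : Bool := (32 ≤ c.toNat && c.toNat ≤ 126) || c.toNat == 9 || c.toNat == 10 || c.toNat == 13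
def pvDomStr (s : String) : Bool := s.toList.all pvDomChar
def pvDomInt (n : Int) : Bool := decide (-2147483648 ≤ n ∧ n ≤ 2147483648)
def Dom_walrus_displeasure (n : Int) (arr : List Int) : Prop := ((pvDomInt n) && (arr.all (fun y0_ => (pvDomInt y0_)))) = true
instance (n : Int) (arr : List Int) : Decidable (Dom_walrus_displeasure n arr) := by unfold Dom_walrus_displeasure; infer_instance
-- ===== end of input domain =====

-- B replaces A's sort-then-sweep by a direct per-index right-to-left scan for the furthest
-- smaller element (objective: alternative/simpler decomposition, not faster).

-- ===== PORT A =====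
-- the 'for val, idx in arr' loop of A, run over the sorted (value, index) pairs
def wdLoopA (pairs : List (Int × Int)) (result : List Int) (maxx : Int) : List Int :=
  match pairs with
  | [] => result
  | (_, idx) :: rest =>
    if maxx < idx then
      wdLoopA rest (PySem.List.pySetD result idx (-1)) idx           -- result[idx] = -1
    else
      wdLoopA rest (PySem.List.pySetD result idx (maxx - idx - 1)) maxx  -- result[idx] = maxx-idx-1

def walrus_displeasure (n : Int) (arr : List Int) : List Int :=
  let result := PySem.List.pyRepeat [(-1 : Int)] n                    -- result = [-1] * n
  let pairs := (PySem.List.enumerate arr 0).map (fun p => (p.2, p.1)) -- [(val, idx) for idx, val in enumerate(arr)]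
  let sortedPairs := PySem.List.sorted2 pairs Prod.fst Prod.snd       -- arr.sort()  (tuples sort lexicographically)
  wdLoopA sortedPairs result (-1)

-- ===== PORT B =====
-- furthest(i): scan j = m-1, m-2, …, i+1, return on the first j with arr[j] < arr[i]
def wdScanB (arr : List Int) (a i : Int) (js : List Int) : Int :=
  match js with
  | [] => -1
  | j :: rest =>
    if PySem.List.pyGetD arr j 0 < a then j - i - 1 else wdScanB arr a i rest

def walrus_displeasure_alt (n : Int) (arr : List Int) : List Int :=
  let m : Int := arr.length
  (PySem.List.pyRange 0 m 1).map
    (fun i => wdScanB arr (PySem.List.pyGetD arr i 0) i (PySem.List.pyRange (m - 1) i (-1)))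
  ++ PySem.List.pyRepeat [(-1 : Int)] (n - m)                         -- + [-1] * (n - m)

-- ===== PRECONDITION & SPEC =====
-- Pre_ excludes exactly the inputs where A raises IndexError: result has max(n,0) slots and
-- A assigns result[idx] for every idx < len(arr), so A returns iff len(arr) ≤ max(n,0).
def Pre_walrus_displeasure (n : Int) (arr : List Int) : Prop := (arr.length : Int) ≤ max n 0
instance (n : Int) (arr : List Int) : Decidable (Pre_walrus_displeasure n arr) := by
  unfold Pre_walrus_displeasure; infer_instance

def pvWitness_walrus_displeasure : Int × List Int := (4, [2, 1, 3, 2])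

def Spec_walrus_displeasure (n : Int) (arr : List Int) (out : List Int) : Prop := out = walrus_displeasure_alt n arr
instance (n : Int) (arr : List Int) (out : List Int) : Decidable (Spec_walrus_displeasure n arr out) := by unfold Spec_walrus_displeasure; infer_instance

-- ===== CLAIM (what is proved, stated in full; the proofs are below) =====
def Claim_equal_walrus_displeasure : Prop := ∀ (n : Int) (arr : List Int), Dom_walrus_displeasure n arr → Pre_walrus_displeasure n arr → Spec_walrus_displeasure n arr (walrus_displeasure n arr)

-- ===== LEMMAS AND PROOFS =====

-- strict and non-strict lexicographic order on (value, index) pairs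
def lexLt (p q : Int × Int) : Prop := p.1 < q.1 ∨ (p.1 = q.1 ∧ p.2 < q.2)
def lexLe (p q : Int × Int) : Prop := p.1 < q.1 ∨ (p.1 = q.1 ∧ p.2 ≤ q.2)

theorem mem_enumerate_iff (xs : List Int) : ∀ (s : Int) (p : Int × Int),
    p ∈ PySem.List.enumerate xs s ↔
      ∃ j : Nat, j < xs.length ∧ p = (s + (j : Int), xs.getD j 0) := by
  induction xs with
  | nil => intro s p; simp [PySem.List.enumerate]
  | cons x t ih =>
    intro s p
    simp only [PySem.List.enumerate, List.mem_cons, ih (s+1)]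
    constructor
    · rintro (rfl | ⟨j, hj, rfl⟩)
      · exact ⟨0, by simp⟩
      · exact ⟨j+1, by simpa using hj, by push_cast; simp [List.getD]; ring_nf⟩
    · rintro ⟨j, hj, rfl⟩
      cases j with
      | zero => left; simp
      | succ j => right; exact ⟨j, by simpa using hj, by push_cast; simp [List.getD]; ring_nf⟩

theorem insertBy_pairwise_lexLe (x : Int × Int) (l : List (Int × Int))
    (h : l.Pairwise lexLe)
    : (PySem.List.insertBy (fun a b => decide (a.1 < b.1) || !decide (b.1 < a.1) && decide (a.2 < b.2)) x l).Pairwise lexLe := by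
  induction l with
  | nil => simp [PySem.List.insertBy, lexLe]
  | cons y ys ih =>
    rcases List.pairwise_cons.mp h with ⟨hy, hys⟩
    simp only [PySem.List.insertBy]
    split
    · rename_i hb
      simp only [Bool.or_eq_true, Bool.and_eq_true, decide_eq_true_eq, Bool.not_eq_true',
        decide_eq_false_iff_not] at hb
      refine List.pairwise_cons.mpr ⟨?_, h⟩
      intro z hz
      rw [List.mem_cons] at hz
      rcases hz with rfl | hz
      · unfold lexLe; omega
      · have := hy z hz
        unfold lexLe at *; omega
    · rename_i hb
      simp only [Bool.or_eq_true, Bool.and_eq_true, decide_eq_true_eq, Bool.not_eq_true',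
        decide_eq_false_iff_not, not_or, not_and] at hb
      refine List.pairwise_cons.mpr ⟨?_, ih hys⟩
      intro z hz
      rw [PySem.List.mem_insertBy] at hz
      rcases hz with rfl | hz
      · unfold lexLe; omega
      · exact hy z hz

theorem sorted2_pairwise_lexLe (xs : List (Int × Int)) :
    (PySem.List.sorted2 xs Prod.fst Prod.snd).Pairwise lexLe := by
  show (List.foldl _ [] xs).Pairwise lexLe
  suffices h : ∀ acc : List (Int × Int), acc.Pairwise lexLe →
      (List.foldl (fun acc x => PySem.List.insertBy (fun a b => decide (a.1 < b.1) || !decide (b.1 < a.1) && decide (a.2 < b.2)) x acc) acc xs).Pairwise lexLe by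
    exact h [] (by simp)
  induction xs with
  | nil => intro acc h; simpa using h
  | cons x t ih => intro acc h; exact ih _ (insertBy_pairwise_lexLe x acc h)

theorem wdLoopA_length (s : List (Int × Int)) : ∀ (r : List Int) (maxx : Int),
    (wdLoopA s r maxx).length = r.length := by
  induction s with
  | nil => intro r maxx; rfl
  | cons p rest ih =>
    intro r maxx
    obtain ⟨v, idx⟩ := p
    simp only [wdLoopA]
    split <;> rw [ih, PySem.List.length_pySetD]

theorem wdLoopA_get (s : List (Int × Int)) : ∀ (r : List Int) (maxx : Int) (k : Nat)
    (hk : k < r.length), (s.map Prod.snd).Nodup → (∀ p ∈ s, 0 ≤ p.2) →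
    (wdLoopA s r maxx)[k]'(by rw [wdLoopA_length]; exact hk) =
      if (k : Int) ∈ s.map Prod.snd then
        (if (s.takeWhile (fun p => p.2 != (k : Int))).foldl (fun a p => max a p.2) maxx < (k : Int)
         then -1
         else (s.takeWhile (fun p => p.2 != (k : Int))).foldl (fun a p => max a p.2) maxx - (k : Int) - 1)
      else r[k] := by
  induction s with
  | nil => intro r maxx k hk _ _; simp [wdLoopA]
  | cons p rest ih =>
    intro r maxx k hk hnd hpos
    obtain ⟨v, idx⟩ := p
    have hidx0 : 0 ≤ idx := hpos (v, idx) (by simp)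
    have hnd' : (rest.map Prod.snd).Nodup := by
      simp only [List.map_cons, List.nodup_cons] at hnd; exact hnd.2
    have hpos' : ∀ q ∈ rest, 0 ≤ q.2 := fun q hq => hpos q (by simp [hq])
    by_cases hik : idx = (k : Int)
    · have hkrest : (k : Int) ∉ rest.map Prod.snd := by
        simp only [List.map_cons, List.nodup_cons] at hnd
        rw [hik] at hnd; exact hnd.1
      have hset : ∀ v' : Int, (PySem.List.pySetD r idx v').length = r.length :=
        fun v' => PySem.List.length_pySetD r idx v'
      have hget : ∀ v' : Int, (PySem.List.pySetD r idx v')[k]'(by rw [hset]; exact hk) = v' := by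
        intro v'
        simp only [PySem.List.pySetD_of_nonneg r v' hidx0]
        have hkk : idx.toNat = k := by omega
        simp only [hkk]
        exact List.getElem_set_self _
      simp only [wdLoopA]
      split <;> rename_i hbr <;>
      · rw [ih _ _ k (by rw [hset]; exact hk) hnd' hpos']
        rw [if_neg hkrest]
        rw [hget]
        rw [if_pos (by simp [hik])]
        simp only [List.takeWhile_cons, hik, bne_self_eq_false, Bool.false_eq_true, if_false,
          List.foldl_nil]
        split <;> rename_i h2 <;> omega
    · -- idx ≠ k : the write does not touch slot k
      have hget : ∀ v' : Int, (PySem.List.pySetD r idx v')[k]'(by rw [PySem.List.length_pySetD]; exact hk) = r[k] := by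
        intro v'
        simp only [PySem.List.pySetD_of_nonneg r v' hidx0]
        exact List.getElem_set_ne (by omega) _
      have hne : ((idx : Int) != (k : Int)) = true := by simpa using hik
      simp only [wdLoopA]
      have step : ∀ (v' newmax : Int), (newmax = max maxx idx) →
          (wdLoopA rest (PySem.List.pySetD r idx v') newmax)[k]'(by rw [wdLoopA_length, PySem.List.length_pySetD]; exact hk) =
          if (k : Int) ∈ ((v,idx) :: rest).map Prod.snd then
            (if (((v,idx) :: rest).takeWhile (fun p => p.2 != (k : Int))).foldl (fun a p => max a p.2) maxx < (k : Int)
             then -1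
             else (((v,idx) :: rest).takeWhile (fun p => p.2 != (k : Int))).foldl (fun a p => max a p.2) maxx - (k : Int) - 1)
          else r[k] := by
        intro v' newmax hnew
        subst hnew
        rw [ih _ _ k (by rw [PySem.List.length_pySetD]; exact hk) hnd' hpos']
        simp only [List.map_cons, List.mem_cons, List.takeWhile_cons, hne, if_true, List.foldl_cons]
        by_cases hmem : (k : Int) ∈ rest.map Prod.snd
        · rw [if_pos hmem, if_pos (Or.inr hmem)]
        · rw [if_neg hmem, if_neg (by rintro (h | h); exact hik h.symm; exact hmem h)]
          exact hget v'
      split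
      · exact step (-1) idx (by omega)
      · exact step (maxx - idx - 1) maxx (by omega)

theorem wdScanB_spec (arr : List Int) (a i M : Int) (hi0 : 0 ≤ i)
    (ha : a = arr.getD i.toNat 0)
    (hM1 : -1 ≤ M)
    (hM2 : ∀ j : Nat, (j : Int) < arr.length →
      (arr.getD j 0 < a ∨ (arr.getD j 0 = a ∧ (j : Int) < i)) → (j : Int) ≤ M)
    (hM3 : M = -1 ∨ (0 ≤ M ∧ M < arr.length ∧
      (arr.getD M.toNat 0 < a ∨ (arr.getD M.toNat 0 = a ∧ M < i)))) :
    ∀ (t : Nat) (b : Int), (b - i).toNat = t → i ≤ b → b < arr.length →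
    (∀ j : Nat, b < (j : Int) → (j : Int) < arr.length → ¬ arr.getD j 0 < a) →
    wdScanB arr a i (PySem.List.pyRange b i (-1)) = if M < i then -1 else M - i - 1 := by
  intro t
  induction t with
  | zero =>
    intro b hbt hib hbm hnohit
    have hbi : b = i := by omega
    rw [hbi, PySem.List.pyRange_neg_one_eq_nil le_rfl]
    have hMlt : M < i := by
      by_contra hge
      rcases hM3 with rfl | ⟨hM0, hMm, hMh⟩
      · omega
      · rcases hMh with hlt | ⟨heq, hlti⟩
        · by_cases hMi' : M = i
          · rw [hMi'] at hlt; rw [ha] at hlt; omega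
          · have : b < (M.toNat : Int) := by omega
            exact absurd hlt (hnohit M.toNat this (by omega))
        · omega
    rw [if_pos hMlt]
    rfl
  | succ t iht =>
    intro b hbt hib hbm hnohit
    have hib' : i < b := by omega
    rw [PySem.List.pyRange_neg_one_cons hib']
    have hb0 : 0 ≤ b := by omega
    show (if PySem.List.pyGetD arr b 0 < a then b - i - 1 else _) = _
    rw [PySem.List.pyGetD_eq_getElem arr 0 hb0 hbm]
    by_cases hhit : arr[b.toNat]'(by omega) < a
    · rw [if_pos hhit]
      have hgd : arr.getD b.toNat 0 = arr[b.toNat]'(by omega) := List.getD_eq_getElem arr 0 (by omega)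
      have hble : b ≤ M := by
        have hcast : arr.getD b.toNat 0 < a := by rw [hgd]; exact hhit
        have := hM2 b.toNat (by omega) (Or.inl hcast)
        omega
      have hMle : M ≤ b := by
        rcases hM3 with rfl | ⟨hM0, hMm, hMh⟩
        · omega
        · by_contra hgt
          rcases hMh with hlt | ⟨heq, hlti⟩
          · exact absurd hlt (hnohit M.toNat (by omega) (by omega))
          · omega
      have : M = b := le_antisymm hMle hble
      rw [if_neg (by omega)]
      omega
    · rw [if_neg hhit]
      apply iht (b - 1) (by omega) (by omega) (by omega)
      intro j hj hjm
      by_cases hjb : (j : Int) = b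
      · have : arr.getD j 0 = arr[b.toNat]'(by omega) := by
          rw [List.getD_eq_getElem arr 0 (by omega)]
          congr 1; omega
        rw [this]; exact hhit
      · exact hnohit j (by omega) hjm

-- ===== VERDICT (by name: the statement is the Claim_ definition above) =====
theorem walrus_displeasure_spec : Claim_equal_walrus_displeasure := by
  intro n arr _hdom hpre
  unfold Spec_walrus_displeasure
  unfold Pre_walrus_displeasure at hpre
  have hA : walrus_displeasure n arr =
      wdLoopA (PySem.List.sorted2 ((PySem.List.enumerate arr 0).map (fun p => (p.2, p.1))) Prod.fst Prod.snd)
        (List.replicate n.toNat (-1)) (-1) := by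
    unfold walrus_displeasure
    rw [PySem.List.pyRepeat_singleton]
  set s := PySem.List.sorted2 ((PySem.List.enumerate arr 0).map (fun p => (p.2, p.1))) Prod.fst Prod.snd with hs
  have hperm : s.Perm ((PySem.List.enumerate arr 0).map (fun p => (p.2, p.1))) :=
    PySem.List.sorted2_perm _ _ _ _
  have hps : (((PySem.List.enumerate arr 0).map (fun p => (p.2, p.1))).map Prod.snd)
      = PySem.List.pyRange 0 (arr.length : Int) 1 := by
    rw [List.map_map]
    simpa using PySem.List.map_fst_enumerate arr 0
  have hsp : (s.map Prod.snd).Perm (PySem.List.pyRange 0 (arr.length : Int) 1) := by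
    have := hperm.map Prod.snd; rwa [hps] at this
  have hsnd_nodup : (s.map Prod.snd).Nodup :=
    hsp.nodup_iff.mpr (PySem.List.nodup_pyRange_one _ _)
  have hmem_s : ∀ p : Int × Int, p ∈ s ↔ ∃ j : Nat, j < arr.length ∧ p = (arr.getD j 0, (j : Int)) := by
    intro p
    rw [hperm.mem_iff, List.mem_map]
    constructor
    · rintro ⟨q, hq, rfl⟩
      rcases (mem_enumerate_iff arr 0 q).mp hq with ⟨j, hj, rfl⟩
      exact ⟨j, hj, by simp⟩
    · rintro ⟨j, hj, rfl⟩
      exact ⟨(0 + (j : Int), arr.getD j 0), (mem_enumerate_iff arr 0 _).mpr ⟨j, hj, rfl⟩, by simp⟩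
  have hspos : ∀ p ∈ s, 0 ≤ p.2 := by
    intro p hp; rcases (hmem_s p).mp hp with ⟨j, hj, rfl⟩; simp
  have hpw : s.Pairwise lexLt := by
    have h1 : s.Pairwise lexLe := sorted2_pairwise_lexLe _
    have h2 : s.Pairwise (fun p q : Int × Int => p.2 ≠ q.2) := List.pairwise_map.mp hsnd_nodup
    exact (h1.and h2).imp (fun {a b} h => by unfold lexLe at h; unfold lexLt; omega)
  have hBdef : walrus_displeasure_alt n arr =
      ((PySem.List.pyRange 0 (arr.length : Int) 1).map
        (fun i => wdScanB arr (PySem.List.pyGetD arr i 0) i (PySem.List.pyRange ((arr.length : Int) - 1) i (-1))))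
      ++ List.replicate (n - (arr.length : Int)).toNat (-1) := by
    simp only [walrus_displeasure_alt]
    rw [PySem.List.pyRepeat_singleton]
  have hlenA : (walrus_displeasure n arr).length = n.toNat := by
    rw [hA, wdLoopA_length, List.length_replicate]
  have hlenBmap : ((PySem.List.pyRange 0 (arr.length : Int) 1).map
      (fun i => wdScanB arr (PySem.List.pyGetD arr i 0) i (PySem.List.pyRange ((arr.length : Int) - 1) i (-1)))).length = arr.length := by
    rw [List.length_map, PySem.List.length_pyRange_one]; omega
  have hlenB : (walrus_displeasure_alt n arr).length = n.toNat := by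
    rw [hBdef, List.length_append, hlenBmap, List.length_replicate]; omega
  refine List.ext_getElem (by rw [hlenA, hlenB]) ?_
  intro k hk1 hk2
  have hkn : k < n.toNat := by rw [hlenA] at hk1; exact hk1
  have hAk := wdLoopA_get s (List.replicate n.toNat (-1)) (-1) k
    (by rw [List.length_replicate]; exact hkn) hsnd_nodup hspos
  by_cases hkm : k < arr.length
  · -- slot k is written by A; both sides compute the furthest-smaller distance
    have hpk : (arr.getD k 0, (k : Int)) ∈ s := (hmem_s _).mpr ⟨k, hkm, rfl⟩
    have hkmem : (k : Int) ∈ s.map Prod.snd := List.mem_map.mpr ⟨_, hpk, rfl⟩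
    have hdw_ne : s.dropWhile (fun p => p.2 != (k : Int)) ≠ [] := by
      intro h0
      have hpk2 := hpk
      have htd := List.takeWhile_append_dropWhile (p := fun p : Int × Int => p.2 != (k : Int)) (l := s)
      rw [h0, List.append_nil] at htd
      rw [← htd] at hpk2
      have := List.mem_takeWhile_imp hpk2
      simp at this
    have hhead : (s.dropWhile (fun p => p.2 != (k : Int))).head hdw_ne = (arr.getD k 0, (k : Int)) := by
      have hf := List.head_dropWhile_not (fun p : Int × Int => p.2 != (k : Int)) hdw_ne
      have hmem : (s.dropWhile (fun p => p.2 != (k : Int))).head hdw_ne ∈ s :=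
        (List.dropWhile_sublist _).mem (List.head_mem hdw_ne)
      rcases (hmem_s _).mp hmem with ⟨j, hj, heq⟩
      rw [heq] at hf ⊢
      simp only [bne_eq_false_iff_eq] at hf
      have hjk : j = k := by exact_mod_cast hf
      rw [hjk]
    have hsplit : s = s.takeWhile (fun p => p.2 != (k : Int)) ++
        (arr.getD k 0, (k : Int)) :: (s.dropWhile (fun p => p.2 != (k : Int))).tail := by
      conv_lhs => rw [← List.takeWhile_append_dropWhile (p := fun p : Int × Int => p.2 != (k : Int)) (l := s)]
      congr 1
      rw [← hhead]
      exact (List.cons_head_tail hdw_ne).symm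
    set pre := s.takeWhile (fun p : Int × Int => p.2 != (k : Int)) with hpre_def
    have hpw2 := hpw
    rw [hsplit, List.pairwise_append] at hpw2
    obtain ⟨hpw_pre, hpw_post, hcross⟩ := hpw2
    have hin_pre : ∀ p ∈ pre, lexLt p (arr.getD k 0, (k : Int)) :=
      fun p hp => hcross p hp _ (List.mem_cons_self)
    have hin_pre2 : ∀ p ∈ s, lexLt p (arr.getD k 0, (k : Int)) → p ∈ pre := by
      intro p hp hlt
      rw [hsplit, List.mem_append, List.mem_cons] at hp
      rcases hp with hp | hp | hp
      · exact hp
      · exfalso; rw [hp] at hlt; unfold lexLt at hlt; omega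
      · exfalso
        have := (List.pairwise_cons.mp hpw_post).1 p hp
        unfold lexLt at this hlt; omega
    set V := pre.foldl (fun a p => max a p.2) (-1) with hV
    have hbounds := PySem.List.le_foldl_max_int pre Prod.snd (-1)
    have hV1 : -1 ≤ V := hbounds.1
    have hVub : ∀ p ∈ pre, p.2 ≤ V := hbounds.2
    have hVatt : V = -1 ∨ ∃ p ∈ pre, p.2 = V := by
      have h := PySem.List.foldl_max_mem (pre.map Prod.snd) (-1)
      rw [List.foldl_map] at h
      rcases h with h | h
      · exact Or.inl h
      · exact Or.inr (List.mem_map.mp h)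
    have hM2 : ∀ j : Nat, (j : Int) < arr.length →
        (arr.getD j 0 < arr.getD k 0 ∨ (arr.getD j 0 = arr.getD k 0 ∧ (j : Int) < (k : Int))) →
        (j : Int) ≤ V := by
      intro j hj hcond
      have hjmem : (arr.getD j 0, (j : Int)) ∈ pre := by
        apply hin_pre2 _ ((hmem_s _).mpr ⟨j, by omega, rfl⟩)
        unfold lexLt; simpa using hcond
      simpa using hVub _ hjmem
    have hM3 : V = -1 ∨ (0 ≤ V ∧ V < arr.length ∧
        (arr.getD V.toNat 0 < arr.getD k 0 ∨ (arr.getD V.toNat 0 = arr.getD k 0 ∧ V < (k : Int)))) := by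
      rcases hVatt with h | ⟨p, hp, hpe⟩
      · exact Or.inl h
      · rcases (hmem_s p).mp ((List.takeWhile_sublist _).mem hp) with ⟨j, hj, rfl⟩
        simp only at hpe
        have hlt := hin_pre _ hp
        right
        rw [← hpe]
        refine ⟨by omega, by omega, ?_⟩
        simp only [Int.toNat_natCast]
        unfold lexLt at hlt
        simpa using hlt
    have hscan := wdScanB_spec arr (arr.getD k 0) (k : Int) V (by omega) (by simp) hV1 hM2 hM3
      ((arr.length : Int) - 1 - (k : Int)).toNat ((arr.length : Int) - 1) rfl (by omega) (by omega)
      (by intro j h1 h2; omega)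
    have hBk : (walrus_displeasure_alt n arr)[k]'hk2 =
        wdScanB arr (arr.getD k 0) (k : Int) (PySem.List.pyRange ((arr.length : Int) - 1) (k : Int) (-1)) := by
      rw [List.getElem_of_eq hBdef hk2]
      rw [List.getElem_append_left (by rw [hlenBmap]; exact hkm)]
      rw [List.getElem_map]
      rw [PySem.List.getElem_pyRange_one]
      simp
    rw [List.getElem_of_eq hA hk1, hAk, if_pos hkmem, hBk, hscan]
  · -- slot k is never written by A; both sides keep the -1 padding
    have hknotmem : (k : Int) ∉ s.map Prod.snd := by
      intro hmem
      have := hsp.mem_iff.mp hmem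
      rw [PySem.List.mem_pyRange_one] at this
      omega
    rw [List.getElem_of_eq hA hk1, hAk, if_neg hknotmem, List.getElem_replicate]
    rw [List.getElem_of_eq hBdef hk2]
    rw [List.getElem_append_right (by rw [hlenBmap]; omega)]
    rw [List.getElem_replicate]
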